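-- pv_equiv track=rewrite | github.com/arjunpatel96/GDS-Private | src/lifelike_gds/network/graph_algorithms.py | get_all_shortest_endpoints
-- ===== SOURCE A (Python) =====
-- def get_all_shortest_endpoints(paths):
--     """
--     Get all shortest paths among a list of paths from each unique starting node and end node.
--     :param paths: list of paths.
--     :return: shortest paths between each start and end point
--     """
--     sources = {p[0] for p in paths}
--     targets = {p[-1] for p in paths}
--     shortests = {s: {t: [] for t in targets} for s in sources}
--     for p in paths:
--         best = shortests[p[0]][p[-1]]
--         if len(best) == 0 or len(best[0]) == len(p):
--             best.append(p)
--         elif len(best[0]) > len(p):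
--             shortests[p[0]][p[-1]] = [p]
--     # unpack
--     return [p for s in shortests for t in shortests[s] for p in shortests[s][t]]
-- ===== SOURCE B (Python) =====
-- def get_all_shortest_endpoints(paths):
--     # Two-stage: (1) one pass computing the minimum path length per (source, target)
--     # pair; (2) emit, per source x target, the paths achieving that minimum, by filtering.
--     # No candidate lists are ever maintained or replaced.
--     minlen = {}
--     for p in paths:
--         k = (p[0], p[-1])
--         if k not in minlen or len(p) < minlen[k]:
--             minlen[k] = len(p)
--     sources = list(dict.fromkeys(p[0] for p in paths))
--     targets = list(dict.fromkeys(p[-1] for p in paths))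
--     out = []
--     for s in sources:
--         for t in targets:
--             for p in paths:
--                 if p[0] == s and p[-1] == t and len(p) == minlen[(s, t)]:
--                     out.append(p)
--     return out
-- ===== Notes on version B (the rewrite author's own statement) =====
-- stated objective: simpler
-- what changed: Replaces A's incremental keep/append/replace candidate-list maintenance with a two-stage algorithm: one pass computes only the minimum length per (source,target) pair, then the shortest paths are emitted by a plain filter over the input per endpoint pair; no per-pair path lists are ever built or rebuilt.
import Mathlib
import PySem

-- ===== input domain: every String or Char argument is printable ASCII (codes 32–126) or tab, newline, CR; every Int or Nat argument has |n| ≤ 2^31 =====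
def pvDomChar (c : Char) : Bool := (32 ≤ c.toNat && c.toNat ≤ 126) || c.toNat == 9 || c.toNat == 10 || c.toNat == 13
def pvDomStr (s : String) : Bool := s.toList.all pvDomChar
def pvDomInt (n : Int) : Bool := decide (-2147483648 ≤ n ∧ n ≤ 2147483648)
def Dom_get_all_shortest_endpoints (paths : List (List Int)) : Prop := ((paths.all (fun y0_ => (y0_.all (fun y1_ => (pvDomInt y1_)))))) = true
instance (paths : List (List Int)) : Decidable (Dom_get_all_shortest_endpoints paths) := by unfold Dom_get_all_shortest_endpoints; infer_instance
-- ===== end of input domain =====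

-- B replaces A's incremental keep/append/replace candidate lists with a two-stage algorithm:
-- one pass records only the minimum length per (source, target) pair, then the shortest paths
-- are emitted by filtering the input per endpoint pair (objective: simpler; not faster).
-- The flattened output order of the Python originals depends on CPython's set/hash order and is
-- compared as a set; the two Lean ports below agree as lists.

-- ===== PORT A =====
def get_all_shortest_endpoints (paths : List (List Int)) : List (List Int) :=
  let sources : PySem.Set Int := PySem.Set.ofList (paths.map (fun p => PySem.List.pyGetD p 0 0))
  let targets : PySem.Set Int := PySem.Set.ofList (paths.map (fun p => PySem.List.pyGetD p (-1) 0))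
  let init : PySem.Dict Int (PySem.Dict Int (List (List Int))) :=
    sources.foldl (fun d s =>
      d.insert s (targets.foldl (fun d2 t => d2.insert t ([] : List (List Int))) PySem.Dict.empty))
      PySem.Dict.empty
  let shortests := paths.foldl (fun d p =>
    let best := (d.getD (PySem.List.pyGetD p 0 0) PySem.Dict.empty).getD (PySem.List.pyGetD p (-1) 0) []
    if best.length = 0 ∨ (best.headD []).length = p.length then
      d.insert (PySem.List.pyGetD p 0 0)
        ((d.getD (PySem.List.pyGetD p 0 0) PySem.Dict.empty).insert (PySem.List.pyGetD p (-1) 0) (best ++ [p]))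
    else if (best.headD []).length > p.length then
      d.insert (PySem.List.pyGetD p 0 0)
        ((d.getD (PySem.List.pyGetD p 0 0) PySem.Dict.empty).insert (PySem.List.pyGetD p (-1) 0) [p])
    else d) init
  shortests.keys.flatMap (fun s =>
    (shortests.getD s PySem.Dict.empty).keys.flatMap (fun t =>
      (shortests.getD s PySem.Dict.empty).getD t []))

-- ===== PORT B =====
-- minlen[(s,t)] in the emit loop is ported as getD … 0: the lookup is reached only after
-- p[0] == s and p[-1] == t hold (Python's short-circuit `and`), and then the key is present,
-- so the default is never used — exact.
def get_all_shortest_endpoints_alt (paths : List (List Int)) : List (List Int) :=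
  let minlen : PySem.Dict (Int × Int) Int :=
    paths.foldl (fun d p =>
      if ¬ d.contains (PySem.List.pyGetD p 0 0, PySem.List.pyGetD p (-1) 0) = true ∨
          (p.length : Int) < d.getD (PySem.List.pyGetD p 0 0, PySem.List.pyGetD p (-1) 0) 0 then
        d.insert (PySem.List.pyGetD p 0 0, PySem.List.pyGetD p (-1) 0) (p.length : Int)
      else d) PySem.Dict.empty
  let sources : List Int := PySem.List.dedup (paths.map (fun p => PySem.List.pyGetD p 0 0))
  let targets : List Int := PySem.List.dedup (paths.map (fun p => PySem.List.pyGetD p (-1) 0))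
  sources.foldl (fun out s =>
    targets.foldl (fun out t =>
      paths.foldl (fun out p =>
        if PySem.List.pyGetD p 0 0 = s ∧ PySem.List.pyGetD p (-1) 0 = t ∧
            (p.length : Int) = minlen.getD (s, t) 0 then
          out ++ [p]
        else out) out) out) []

-- ===== PRECONDITION & SPEC =====
-- Pre_ excludes inputs containing an empty path, on which the Python A raises IndexError (p[0]).
def Pre_get_all_shortest_endpoints (paths : List (List Int)) : Prop := ∀ p ∈ paths, p ≠ []
instance (paths : List (List Int)) : Decidable (Pre_get_all_shortest_endpoints paths) := by
  unfold Pre_get_all_shortest_endpoints; infer_instance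
def pvWitness_get_all_shortest_endpoints : List (List Int) := [[1, 2, 3], [1, 3], [2, 3], [1, 2]]
def Spec_get_all_shortest_endpoints (paths : List (List Int)) (out : List (List Int)) : Prop := out = get_all_shortest_endpoints_alt paths
instance (paths : List (List Int)) (out : List (List Int)) : Decidable (Spec_get_all_shortest_endpoints paths out) := by unfold Spec_get_all_shortest_endpoints; infer_instance

-- ===== CLAIM (what is proved, stated in full; the proofs are below) =====
def Claim_equal_get_all_shortest_endpoints : Prop := ∀ (paths : List (List Int)), Dom_get_all_shortest_endpoints paths → Pre_get_all_shortest_endpoints paths → Spec_get_all_shortest_endpoints paths (get_all_shortest_endpoints paths)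

-- ===== LEMMAS AND PROOFS =====

-- abbreviations for the proofs (not used by the ports)
def pvHead (p : List Int) : Int := PySem.List.pyGetD p 0 0
def pvLast (p : List Int) : Int := PySem.List.pyGetD p (-1) 0
def pvKey (p : List Int) : Int × Int := (pvHead p, pvLast p)

-- the per-(source,target) update A performs
def pvStep (acc : List (List Int)) (p : List Int) : List (List Int) :=
  if acc.length = 0 ∨ (acc.headD []).length = p.length then acc ++ [p]
  else if (acc.headD []).length > p.length then [p] else acc

-- the reference group of a (source,target) pair (A's final bucket)
def pvG (xs : List (List Int)) (k : Int × Int) : List (List Int) :=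
  xs.foldl (fun acc p => if pvKey p = k then pvStep acc p else acc) []

-- A's body of the main fold
def pvAStep (d : PySem.Dict Int (PySem.Dict Int (List (List Int)))) (p : List Int) :
    PySem.Dict Int (PySem.Dict Int (List (List Int))) :=
  if ((d.getD (PySem.List.pyGetD p 0 0) PySem.Dict.empty).getD (PySem.List.pyGetD p (-1) 0) []).length = 0 ∨
      (((d.getD (PySem.List.pyGetD p 0 0) PySem.Dict.empty).getD (PySem.List.pyGetD p (-1) 0) []).headD []).length = p.length then
    d.insert (PySem.List.pyGetD p 0 0)
      ((d.getD (PySem.List.pyGetD p 0 0) PySem.Dict.empty).insert (PySem.List.pyGetD p (-1) 0)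
        (((d.getD (PySem.List.pyGetD p 0 0) PySem.Dict.empty).getD (PySem.List.pyGetD p (-1) 0) []) ++ [p]))
  else if (((d.getD (PySem.List.pyGetD p 0 0) PySem.Dict.empty).getD (PySem.List.pyGetD p (-1) 0) []).headD []).length > p.length then
    d.insert (PySem.List.pyGetD p 0 0)
      ((d.getD (PySem.List.pyGetD p 0 0) PySem.Dict.empty).insert (PySem.List.pyGetD p (-1) 0) [p])
  else d

-- B's body of the min-length fold
def pvMStep (d : PySem.Dict (Int × Int) Int) (p : List Int) : PySem.Dict (Int × Int) Int :=
  if ¬ d.contains (PySem.List.pyGetD p 0 0, PySem.List.pyGetD p (-1) 0) = true ∨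
      (p.length : Int) < d.getD (PySem.List.pyGetD p 0 0, PySem.List.pyGetD p (-1) 0) 0 then
    d.insert (PySem.List.pyGetD p 0 0, PySem.List.pyGetD p (-1) 0) (p.length : Int)
  else d

-- the scalar min-length fold at one key
def pvMF (xs : List (List Int)) (k : Int × Int) : Option Int :=
  xs.foldl (fun o p =>
    if pvKey p = k then
      match o with
      | none => some (p.length : Int)
      | some v => if (p.length : Int) < v then some (p.length : Int) else some v
    else o) none

-- the distinct sources / targets, in first-occurrence order
def pvS (paths : List (List Int)) : List Int := PySem.Set.ofList (paths.map pvHead)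
def pvT (paths : List (List Int)) : List Int := PySem.Set.ofList (paths.map pvLast)

theorem pv_contains_keys {κ ν : Type} [BEq κ] [LawfulBEq κ] (d : PySem.Dict κ ν) (k : κ) :
    d.contains k = PySem.Set.contains d.keys k := by
  simp only [PySem.Dict.contains, PySem.Set.contains, PySem.Dict.keys]
  rw [Bool.eq_iff_iff]
  simp only [List.any_eq_true, List.contains_iff_mem, List.mem_map, beq_iff_eq]

theorem pv_keys_insert {κ ν : Type} [BEq κ] [LawfulBEq κ] (d : PySem.Dict κ ν) (k : κ) (v : ν) :
    (d.insert k v).keys = PySem.Set.add d.keys k := by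
  by_cases h : d.contains k = true
  · rw [PySem.Set.add, ← pv_contains_keys, h]
    simp only [PySem.Dict.insert, h, if_true, PySem.Dict.keys, List.map_map]
    apply List.map_congr_left
    intro p hp
    by_cases hpk : (p.1 == k) = true
    · simp [Function.comp, hpk]; exact (beq_iff_eq.mp hpk).symm
    · simp [Function.comp, hpk]
  · rw [PySem.Set.add, ← pv_contains_keys]
    rw [Bool.not_eq_true] at h
    rw [h]
    simp [PySem.Dict.insert, h, PySem.Dict.keys]

theorem pv_keys_insert_of_mem {κ ν : Type} [BEq κ] [LawfulBEq κ] (d : PySem.Dict κ ν) (k : κ) (v : ν)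
    (h : k ∈ d.keys) : (d.insert k v).keys = d.keys := by
  rw [pv_keys_insert, PySem.Set.add, PySem.Set.contains]
  simp [h]

-- B min fold: pointwise value
theorem pvM_get? (xs : List (List Int)) :
    ∀ (d : PySem.Dict (Int × Int) Int) (k : Int × Int),
    ((xs.foldl pvMStep d).get? k) =
      xs.foldl (fun o p =>
        if pvKey p = k then
          match o with
          | none => some ((p.length : Int))
          | some v => if (p.length : Int) < v then some ((p.length : Int)) else some v
        else o) (d.get? k) := by
  induction xs with
  | nil => intro d k; rfl
  | cons p xs ih =>
    intro d k
    simp only [List.foldl_cons]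
    rw [ih]
    congr 1
    show (pvMStep d p).get? k = _
    unfold pvMStep
    by_cases hk : pvKey p = k
    · rw [if_pos hk]
      unfold pvKey pvHead pvLast at hk
      subst hk
      rw [PySem.Dict.contains_eq_isSome_get?, PySem.Dict.getD_eq_get?_getD]
      cases hg : d.get? (PySem.List.pyGetD p 0 0, PySem.List.pyGetD p (-1) 0) with
      | none => simp [PySem.Dict.get?_insert_self]
      | some v =>
        simp only [Option.isSome_some, Option.getD_some]
        by_cases hlt : (p.length : Int) < v
        · rw [if_pos (Or.inr hlt), PySem.Dict.get?_insert_self, if_pos hlt]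
        · rw [if_neg (by simp [hlt]), if_neg hlt, hg]
    · rw [if_neg hk]
      unfold pvKey pvHead pvLast at hk
      split_ifs with h1
      · rw [PySem.Dict.get?_insert_of_ne _ _ (Ne.symm hk)]
      · rfl

-- A main fold: pointwise value
theorem pvA_val (xs : List (List Int)) :
    ∀ (d : PySem.Dict Int (PySem.Dict Int (List (List Int)))) (s t : Int),
    (((xs.foldl pvAStep d).getD s PySem.Dict.empty).getD t []) =
      xs.foldl (fun acc p => if pvKey p = (s, t) then pvStep acc p else acc)
        ((d.getD s PySem.Dict.empty).getD t []) := by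
  induction xs with
  | nil => intro d s t; rfl
  | cons p xs ih =>
    intro d s t
    simp only [List.foldl_cons]
    rw [ih]
    congr 1
    show ((pvAStep d p).getD s PySem.Dict.empty).getD t [] =
      if pvKey p = (s, t) then pvStep ((d.getD s PySem.Dict.empty).getD t []) p
      else (d.getD s PySem.Dict.empty).getD t []
    unfold pvAStep
    by_cases hk : pvKey p = (s, t)
    · rw [if_pos hk]
      unfold pvKey pvHead pvLast at hk
      have hs : PySem.List.pyGetD p 0 0 = s := congrArg Prod.fst hk
      have ht : PySem.List.pyGetD p (-1) 0 = t := congrArg Prod.snd hk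
      subst hs; subst ht
      unfold pvStep
      split_ifs with h1 h2
      · rw [PySem.Dict.getD_insert_self, PySem.Dict.getD_insert_self]
      · rw [PySem.Dict.getD_insert_self, PySem.Dict.getD_insert_self]
      · rfl
    · rw [if_neg hk]
      unfold pvKey pvHead pvLast at hk
      by_cases hs : s = PySem.List.pyGetD p 0 0
      · subst hs
        have ht : t ≠ PySem.List.pyGetD p (-1) 0 := by
          intro he; exact hk (by rw [he])
        split_ifs with h1 h2
        · rw [PySem.Dict.getD_insert_self, PySem.Dict.getD_insert_of_ne _ _ _ ht]
        · rw [PySem.Dict.getD_insert_self, PySem.Dict.getD_insert_of_ne _ _ _ ht]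
        · rfl
      · split_ifs with h1 h2
        · rw [PySem.Dict.getD_insert_of_ne _ _ _ hs]
        · rw [PySem.Dict.getD_insert_of_ne _ _ _ hs]
        · rfl

-- A main fold: keys invariant
theorem pvA_keys (xs : List (List Int)) (S T : List Int) :
    ∀ (d : PySem.Dict Int (PySem.Dict Int (List (List Int)))),
    d.keys = S → (∀ s, (d.getD s PySem.Dict.empty).keys = if s ∈ S then T else []) →
    (∀ p ∈ xs, pvHead p ∈ S ∧ pvLast p ∈ T) →
    (xs.foldl pvAStep d).keys = S ∧
      ∀ s, ((xs.foldl pvAStep d).getD s PySem.Dict.empty).keys = if s ∈ S then T else [] := by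
  induction xs with
  | nil => intro d h1 h2 _; exact ⟨h1, h2⟩
  | cons p xs ih =>
    intro d hk hi hm
    simp only [List.foldl_cons]
    obtain ⟨hph, hpt⟩ := hm p (List.mem_cons_self )
    have hmx : ∀ q ∈ xs, pvHead q ∈ S ∧ pvLast q ∈ T := fun q hq => hm q (List.mem_cons_of_mem _ hq)
    apply ih
    · -- keys preserved
      unfold pvAStep
      unfold pvHead at hph
      split_ifs with h1 h2
      · rw [pv_keys_insert_of_mem _ _ _ (by rw [hk]; exact hph), hk]
      · rw [pv_keys_insert_of_mem _ _ _ (by rw [hk]; exact hph), hk]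
      · exact hk
    · -- inner keys preserved
      intro s
      rw [← hi s]
      unfold pvAStep
      unfold pvHead at hph
      unfold pvLast at hpt
      by_cases hs : s = PySem.List.pyGetD p 0 0
      · subst hs
        have hin : (d.getD (PySem.List.pyGetD p 0 0) PySem.Dict.empty).keys = T := by
          rw [hi]; rw [if_pos hph]
        split_ifs with h1 h2
        · rw [PySem.Dict.getD_insert_self, pv_keys_insert_of_mem _ _ _ (by rw [hin]; exact hpt)]
        · rw [PySem.Dict.getD_insert_self, pv_keys_insert_of_mem _ _ _ (by rw [hin]; exact hpt)]
        · rfl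
      · split_ifs with h1 h2
        · rw [PySem.Dict.getD_insert_of_ne _ _ _ hs]
        · rw [PySem.Dict.getD_insert_of_ne _ _ _ hs]
        · rfl
    · exact hmx

-- A's initial dense dict: lookup
theorem pvA_init_getD (S : List Int) (C : PySem.Dict Int (List (List Int))) :
    ∀ (d : PySem.Dict Int (PySem.Dict Int (List (List Int)))) (s : Int),
    ((S.foldl (fun d s => d.insert s C) d).getD s PySem.Dict.empty) =
      if s ∈ S then C else d.getD s PySem.Dict.empty := by
  induction S with
  | nil => intro d s; simp
  | cons a S ih =>
    intro d s
    simp only [List.foldl_cons]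
    rw [ih]
    by_cases hmem : s ∈ S
    · rw [if_pos hmem, if_pos (List.mem_cons_of_mem _ hmem)]
    · rw [if_neg hmem]
      by_cases hsa : s = a
      · subst hsa
        rw [PySem.Dict.getD_insert_self, if_pos (List.mem_cons_self)]
      · rw [PySem.Dict.getD_insert_of_ne _ _ _ hsa, if_neg (by simp [hsa, hmem])]

-- A's inner initial dict: every value is []
theorem pvA_inner_getD (T : List Int) :
    ∀ (d : PySem.Dict Int (List (List Int))), (∀ t', d.getD t' [] = []) →
    ∀ (t : Int), ((T.foldl (fun d2 t => d2.insert t ([] : List (List Int))) d).getD t []) = [] := by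
  induction T with
  | nil => intro d h t; exact h t
  | cons a T ih =>
    intro d h t
    simp only [List.foldl_cons]
    apply ih
    intro t'
    by_cases ht : t' = a
    · subst ht; rw [PySem.Dict.getD_insert_self]
    · rw [PySem.Dict.getD_insert_of_ne _ _ _ ht]; exact h t'

theorem pv_flatMap_congr {α β : Type} (l : List α) (f g : α → List β)
    (h : ∀ x ∈ l, f x = g x) : l.flatMap f = l.flatMap g := by
  simp only [List.flatMap_def]
  rw [List.map_congr_left h]

theorem pv_mem_S (paths : List (List Int)) (p : List Int) (hp : p ∈ paths) :
    pvHead p ∈ pvS paths := by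
  unfold pvS
  rw [PySem.Set.mem_ofList]
  exact List.mem_map.mpr ⟨p, hp, rfl⟩

theorem pv_mem_T (paths : List (List Int)) (p : List Int) (hp : p ∈ paths) :
    pvLast p ∈ pvT paths := by
  unfold pvT
  rw [PySem.Set.mem_ofList]
  exact List.mem_map.mpr ⟨p, hp, rfl⟩

-- A's initial dicts
def pvInner (paths : List (List Int)) : PySem.Dict Int (List (List Int)) :=
  (pvT paths).foldl (fun d2 t => d2.insert t ([] : List (List Int))) PySem.Dict.empty
def pvInit (paths : List (List Int)) : PySem.Dict Int (PySem.Dict Int (List (List Int))) :=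
  (pvS paths).foldl (fun d s => d.insert s (pvInner paths)) PySem.Dict.empty

-- A computes: for each source (set order), each target (set order), the kept group
theorem pvA_char (paths : List (List Int)) :
    get_all_shortest_endpoints paths =
      (pvS paths).flatMap (fun s => (pvT paths).flatMap (fun t => pvG paths (s, t))) := by
  have e : get_all_shortest_endpoints paths =
      (paths.foldl pvAStep (pvInit paths)).keys.flatMap (fun s =>
        ((paths.foldl pvAStep (pvInit paths)).getD s PySem.Dict.empty).keys.flatMap (fun t =>
          ((paths.foldl pvAStep (pvInit paths)).getD s PySem.Dict.empty).getD t [])) := rfl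
  have hinner_keys : (pvInner paths).keys = pvT paths := by
    unfold pvInner
    rw [PySem.Dict.keys_foldl_insert]
    show PySem.Set.update [] (pvT paths) = pvT paths
    rw [PySem.Set.update_nil_left]
    exact PySem.Set.ofList_eq_self_of_nodup _ (PySem.Set.nodup_ofList _)
  have hkS : (pvInit paths).keys = pvS paths := by
    unfold pvInit
    rw [PySem.Dict.keys_foldl_insert]
    show PySem.Set.update [] (pvS paths) = pvS paths
    rw [PySem.Set.update_nil_left]
    exact PySem.Set.ofList_eq_self_of_nodup _ (PySem.Set.nodup_ofList _)
  have hi : ∀ s, ((pvInit paths).getD s PySem.Dict.empty).keys =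
      if s ∈ pvS paths then pvT paths else [] := by
    intro s
    unfold pvInit
    rw [pvA_init_getD]
    by_cases hs : s ∈ pvS paths
    · rw [if_pos hs, if_pos hs, hinner_keys]
    · rw [if_neg hs, if_neg hs]; rfl
  have hv0 : ∀ s t, ((pvInit paths).getD s PySem.Dict.empty).getD t [] = [] := by
    intro s t
    unfold pvInit
    rw [pvA_init_getD]
    by_cases hs : s ∈ pvS paths
    · rw [if_pos hs]
      unfold pvInner
      exact pvA_inner_getD _ _ (fun _ => rfl) t
    · rw [if_neg hs]; rfl
  have hm : ∀ p ∈ paths, pvHead p ∈ pvS paths ∧ pvLast p ∈ pvT paths :=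
    fun p hp => ⟨pv_mem_S paths p hp, pv_mem_T paths p hp⟩
  obtain ⟨hK, hI⟩ := pvA_keys paths (pvS paths) (pvT paths) (pvInit paths) hkS hi hm
  rw [e, hK]
  apply pv_flatMap_congr
  intro s hs
  rw [hI s, if_pos hs]
  apply pv_flatMap_congr
  intro t _
  rw [pvA_val, hv0]
  rfl

-- head of A's kept bucket has the minimal length
theorem pv_head_len (xs : List (List Int)) (k : Int × Int) (v : Int)
    (h2 : pvG xs k = xs.filter (fun p => decide (pvKey p = k ∧ (p.length : Int) = v)))
    (h3 : pvG xs k ≠ []) : (((pvG xs k).headD []).length : Int) = v := by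
  cases hg : pvG xs k with
  | nil => exact absurd hg h3
  | cons a tl =>
    have ha : a ∈ pvG xs k := by rw [hg]; exact List.mem_cons_self
    rw [h2] at ha
    have := List.of_mem_filter ha
    simp only [decide_eq_true_eq] at this
    simpa using this.2

-- A's kept group is exactly the min-length filter B computes
theorem pvGM (xs : List (List Int)) (k : Int × Int) :
    (pvMF xs k = none ∧ pvG xs k = [] ∧
      xs.filter (fun p => decide (pvKey p = k)) = []) ∨
    (∃ v : Int, pvMF xs k = some v ∧
      pvG xs k = xs.filter (fun p => decide (pvKey p = k ∧ (p.length : Int) = v)) ∧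
      pvG xs k ≠ [] ∧ ∀ q ∈ xs, pvKey q = k → v ≤ (q.length : Int)) := by
  induction xs using List.reverseRecOn with
  | nil => exact Or.inl ⟨rfl, rfl, rfl⟩
  | append_singleton xs p ih =>
    have hg : pvG (xs ++ [p]) k = (if pvKey p = k then pvStep (pvG xs k) p else pvG xs k) := by
      unfold pvG; rw [List.foldl_append]; rfl
    have hm : pvMF (xs ++ [p]) k =
        (if pvKey p = k then
          match pvMF xs k with
          | none => some ((p.length : Int))
          | some v => if (p.length : Int) < v then some ((p.length : Int)) else some v
        else pvMF xs k) := by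
      unfold pvMF; rw [List.foldl_append]; rfl
    by_cases hk : pvKey p = k
    · rw [hg, hm, if_pos hk, if_pos hk]
      rcases ih with ⟨h1, h2, h3⟩ | ⟨v, h1, h2, h3, h4⟩
      · -- first element of this key
        right
        have hrep : pvStep (pvG xs k) p = [p] := by
          rw [h2]; rfl
        refine ⟨(p.length : Int), by rw [h1], ?_, by rw [hrep]; simp, ?_⟩
        · have hnil : xs.filter
              (fun q => decide (pvKey q = k ∧ (q.length : Int) = (p.length : Int))) = [] := by
            rw [List.filter_eq_nil_iff] at h3 ⊢
            intro q hq hc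
            simp only [decide_eq_true_eq] at hc
            exact h3 q hq (by simp [hc.1])
          rw [hrep, List.filter_append, hnil]
          simp [hk]
        · intro q hq hqk
          rcases List.mem_append.mp hq with hq | hq
          · exact absurd (by simp [hqk] : decide (pvKey q = k) = true)
              (by rw [List.filter_eq_nil_iff] at h3; simpa using h3 q hq)
          · rw [List.mem_singleton.mp hq]
      · have hhead := pv_head_len xs k v h2 h3
        have hlen0 : ¬ (pvG xs k).length = 0 := by
          simpa [List.length_eq_zero_iff] using h3
        by_cases hlt : (p.length : Int) < v
        · -- strictly shorter: replace
          right
          have hrep : pvStep (pvG xs k) p = [p] := by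
            unfold pvStep
            rw [if_neg (by rintro (h | h) <;> omega), if_pos (by omega)]
          refine ⟨(p.length : Int), by rw [h1]; simp [hlt], ?_, by rw [hrep]; simp, ?_⟩
          · have hnil : xs.filter
                (fun q => decide (pvKey q = k ∧ (q.length : Int) = (p.length : Int))) = [] := by
              rw [List.filter_eq_nil_iff]
              intro q hq hc
              simp only [decide_eq_true_eq] at hc
              have := h4 q hq hc.1
              omega
            rw [hrep, List.filter_append, hnil]
            simp [hk]
          · intro q hq hqk
            rcases List.mem_append.mp hq with hq | hq
            · have := h4 q hq hqk; omega
            · rw [List.mem_singleton.mp hq]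
        · by_cases heq : (p.length : Int) = v
          · -- tie: append
            right
            have happ : pvStep (pvG xs k) p = pvG xs k ++ [p] := by
              unfold pvStep
              rw [if_pos (Or.inr (by omega))]
            refine ⟨v, by rw [h1]; simp [hlt], ?_, by rw [happ]; simp, ?_⟩
            · rw [happ, List.filter_append, h2]
              simp [hk, heq]
            · intro q hq hqk
              rcases List.mem_append.mp hq with hq | hq
              · exact h4 q hq hqk
              · rw [List.mem_singleton.mp hq]; omega
          · -- strictly longer: unchanged
            right
            have hvlt : v < (p.length : Int) := by omega
            have hsame : pvStep (pvG xs k) p = pvG xs k := by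
              unfold pvStep
              rw [if_neg (by rintro (h | h) <;> omega), if_neg (by omega)]
            refine ⟨v, by rw [h1]; simp [hlt], ?_, by rw [hsame]; exact h3, ?_⟩
            · rw [hsame, List.filter_append, h2]
              have hp1 : [p].filter (fun q => decide (pvKey q = k ∧ (q.length : Int) = v)) = [] := by
                simp [heq]
              rw [hp1, List.append_nil]
            · intro q hq hqk
              rcases List.mem_append.mp hq with hq | hq
              · exact h4 q hq hqk
              · rw [List.mem_singleton.mp hq]; omega
    · rw [hg, hm, if_neg hk, if_neg hk]
      rcases ih with ⟨h1, h2, h3⟩ | ⟨v, h1, h2, h3, h4⟩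
      · left
        refine ⟨h1, h2, ?_⟩
        rw [List.filter_append, h3]
        simp [hk]
      · right
        refine ⟨v, h1, ?_, h3, ?_⟩
        · rw [List.filter_append, h2]
          simp [hk]
        · intro q hq hqk
          rcases List.mem_append.mp hq with hq | hq
          · exact h4 q hq hqk
          · exact absurd ((List.mem_singleton.mp hq) ▸ hqk) hk

-- the min-length dict's default-0 lookup agrees with pvMF when the key occurs
theorem pvM_getD (paths : List (List Int)) (k : Int × Int) :
    (paths.foldl pvMStep PySem.Dict.empty).getD k 0 = (pvMF paths k).getD 0 := by
  rw [PySem.Dict.getD_eq_get?_getD, pvM_get?]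
  rfl

-- B computes: for each source, each target (first-occurrence order), the min-length filter
theorem pvB_char (paths : List (List Int)) :
    get_all_shortest_endpoints_alt paths =
      (pvS paths).flatMap (fun s => (pvT paths).flatMap (fun t =>
        paths.filter (fun p => decide (pvHead p = s ∧ pvLast p = t ∧
          (p.length : Int) = (paths.foldl pvMStep PySem.Dict.empty).getD (s, t) 0)))) := by
  have tri : ∀ (S T : List Int) (acc : List (List Int)),
      S.foldl (fun out s => T.foldl (fun out t =>
        paths.foldl (fun out p =>
          if pvHead p = s ∧ pvLast p = t ∧
              (p.length : Int) = (paths.foldl pvMStep PySem.Dict.empty).getD (s, t) 0 then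
            out ++ [p]
          else out) out) out) acc =
      acc ++ S.flatMap (fun s => T.flatMap (fun t =>
        paths.filter (fun p => decide (pvHead p = s ∧ pvLast p = t ∧
          (p.length : Int) = (paths.foldl pvMStep PySem.Dict.empty).getD (s, t) 0)))) := by
    intro S
    induction S with
    | nil => intro T acc; simp
    | cons a S ihS =>
      intro T acc
      simp only [List.foldl_cons, List.flatMap_cons]
      rw [ihS, ← List.append_assoc]
      congr 1
      induction T generalizing acc with
      | nil => simp
      | cons b T ihT =>
        simp only [List.foldl_cons, List.flatMap_cons]
        rw [PySem.List.foldl_append_ite_eq_filter, ihT, List.append_assoc]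
  have e : get_all_shortest_endpoints_alt paths =
      (PySem.List.dedup (paths.map pvHead)).foldl (fun out s =>
        (PySem.List.dedup (paths.map pvLast)).foldl (fun out t =>
          paths.foldl (fun out p =>
            if pvHead p = s ∧ pvLast p = t ∧
                (p.length : Int) = (paths.foldl pvMStep PySem.Dict.empty).getD (s, t) 0 then
              out ++ [p]
            else out) out) out) [] := rfl
  rw [e, PySem.List.dedup_eq_ofList, PySem.List.dedup_eq_ofList, tri]
  rfl

-- ===== VERDICT (by name: the statement is the Claim_ definition above) =====
theorem get_all_shortest_endpoints_spec : Claim_equal_get_all_shortest_endpoints := by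
  intro paths _ _
  unfold Spec_get_all_shortest_endpoints
  rw [pvA_char, pvB_char]
  apply pv_flatMap_congr
  intro s _
  apply pv_flatMap_congr
  intro t _
  rw [pvM_getD]
  rcases pvGM paths (s, t) with ⟨hm, hg, hf⟩ | ⟨v, hm, hg, -, -⟩
  · rw [hg, hm]
    symm
    rw [List.filter_eq_nil_iff] at hf ⊢
    intro p hp hc
    exact hf p hp (by
      simp only [decide_eq_true_eq] at hc ⊢
      exact Prod.ext hc.1 hc.2.1)
  · rw [hg, hm]
    apply List.filter_congr
    intro p _
    simp only [Option.getD_some, pvKey, Prod.mk.injEq, and_assoc]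
    exact decide_eq_decide.mpr Iff.rfl
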